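-- pv_equiv track=rewrite | github.com/leonorbrodrigues-png/LeonorBR_thesis- | merging approach/approach3.2.py | get_all_ancestors_structural
-- ===== SOURCE A (Python) =====
-- def get_all_ancestors_structural(po_term, ontology, visited=None):
--
--     if visited is None:
--         visited = set()
--
--     if po_term not in ontology:
--         return visited
--
--     visited.add(po_term)
--
--     for rel_type, parent in ontology[po_term].get('parents', []):
--         if parent not in visited:
--             get_all_ancestors_structural(parent, ontology, visited)
--
--     return visited
-- ===== SOURCE B (Python) =====
-- def get_all_ancestors_structural(po_term, ontology, visited=None):
--     # Iterative DFS with an explicit stack instead of recursion.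
--     # Mutates the caller-supplied `visited` set in place, like the original.
--     if visited is None:
--         visited = set()
--
--     if po_term not in ontology:
--         return visited
--
--     visited.add(po_term)
--     stack = [parent for _, parent in reversed(ontology[po_term].get('parents', []))]
--
--     while stack:
--         node = stack.pop()
--         if node in visited or node not in ontology:
--             continue
--         visited.add(node)
--         stack.extend(parent for _, parent in reversed(ontology[node].get('parents', [])))
--
--     return visited
-- ===== Notes on version B (the rewrite author's own statement) =====
-- stated objective: alternative
-- what changed: The recursive DFS over ancestor terms is replaced by an iterative DFS with an explicit stack (push parents in reverse, pop and visit), removing recursion entirely while keeping the same traversal.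
import Mathlib
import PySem

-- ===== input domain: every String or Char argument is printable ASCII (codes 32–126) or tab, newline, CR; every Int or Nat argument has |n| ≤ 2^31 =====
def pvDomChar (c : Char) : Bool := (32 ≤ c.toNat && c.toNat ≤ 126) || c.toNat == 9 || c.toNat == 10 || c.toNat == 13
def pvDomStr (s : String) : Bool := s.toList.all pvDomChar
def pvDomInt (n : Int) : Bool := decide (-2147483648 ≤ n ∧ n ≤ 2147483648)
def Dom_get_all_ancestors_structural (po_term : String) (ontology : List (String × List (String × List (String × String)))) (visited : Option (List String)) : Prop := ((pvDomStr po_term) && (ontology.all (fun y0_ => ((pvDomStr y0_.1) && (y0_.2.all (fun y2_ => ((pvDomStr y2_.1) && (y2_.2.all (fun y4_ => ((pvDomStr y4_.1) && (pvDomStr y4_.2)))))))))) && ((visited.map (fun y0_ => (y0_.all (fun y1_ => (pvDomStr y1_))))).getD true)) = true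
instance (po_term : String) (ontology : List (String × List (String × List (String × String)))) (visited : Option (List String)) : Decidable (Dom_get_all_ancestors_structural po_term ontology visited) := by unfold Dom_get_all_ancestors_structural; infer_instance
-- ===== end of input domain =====

-- B replaces A's recursive DFS by an iterative DFS over an explicit stack (same traversal order, no
-- recursion); both mutate the caller-supplied `visited` set in Python — the theorems below are about
-- the returned value.

-- ===== PORT A =====

-- number of ontology keys not yet visited; used only as a termination measure / fuel bound
def pvDcard (ontology : List (String × List (String × List (String × String)))) (vis : List String) : Nat :=
  ((ontology.map Prod.fst).toFinset \ vis.toFinset).card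

-- recursion depth of A is bounded by the number of distinct ontology keys + 2, so
-- `ontology.length + 2` fuel is never exhausted (proved implicitly by the equivalence proof's bounds)
def pvAncGo (ontology : List (String × List (String × List (String × String)))) :
    Nat → String → List String → List String
  | 0, _, visited => visited
  | fuel+1, po_term, visited =>
    match (PySem.Dict.mk ontology).get? po_term with          -- `po_term not in ontology` + `ontology[po_term]`
    | none => visited
    | some entry =>
      let visited := PySem.Set.add visited po_term            -- visited.add(po_term)
      ((PySem.Dict.mk entry).getD "parents" []).foldl         -- for rel_type, parent in …get('parents', [])
        (fun vis pr => if PySem.Set.contains vis pr.2 then vis else pvAncGo ontology fuel pr.2 vis)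
        visited

def get_all_ancestors_structural (po_term : String) (ontology : List (String × List (String × List (String × String)))) (visited : Option (List String)) : List String :=
  pvAncGo ontology (ontology.length + 2) po_term (visited.getD [])   -- visited = set() if None

-- ===== PORT B =====

-- two lemmas the stack loop's termination proof needs
theorem pvMemKeys_of_get? {ν : Type} (ont : List (String × ν)) (k : String) (v : ν)
    (h : (PySem.Dict.mk ont).get? k = some v) : k ∈ ont.map Prod.fst := by
  induction ont with
  | nil => simp [PySem.Dict.get?] at h
  | cons p rest ih =>
    rw [show (p = (p.1, p.2)) from rfl, PySem.Dict.get?_mk_cons] at h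
    by_cases hk : p.1 = k
    · simp [hk]
    · simp [show (p.1 == k) = false from by simp [hk]] at h
      simp [ih h]

theorem pvDcard_add_lt (ontology : List (String × List (String × List (String × String))))
    (vis : List String) (k : String) (hk : k ∈ ontology.map Prod.fst) (hv : k ∉ vis) :
    pvDcard ontology (PySem.Set.add vis k) < pvDcard ontology vis := by
  have hadd : PySem.Set.add vis k = vis ++ [k] := by
    simp [PySem.Set.add, List.contains_eq_mem, hv]
  unfold pvDcard
  rw [hadd]
  have hts : (vis ++ [k]).toFinset = insert k vis.toFinset := by
    ext x; simp
  rw [hts, Finset.sdiff_insert]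
  exact Finset.card_erase_lt_of_mem (by simp [hk, hv])

-- Iterative DFS: the stack is kept top-first (head = Python's `stack[-1]`); Python's
-- `stack.extend(reversed(parents))` then `stack.pop()` corresponds to prepending the parents in order.
def pvAncStack (ontology : List (String × List (String × List (String × String)))) :
    List String → List String → List String
  | [], visited => visited
  | node :: rest, visited =>
    if hv : PySem.Set.contains visited node then pvAncStack ontology rest visited
    else
      match h : (PySem.Dict.mk ontology).get? node with
      | none => pvAncStack ontology rest visited
      | some entry =>
        pvAncStack ontology
          (((PySem.Dict.mk entry).getD "parents" []).map Prod.snd ++ rest)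
          (PySem.Set.add visited node)
  termination_by stack visited => (pvDcard ontology visited, stack.length)
  decreasing_by
  · exact Prod.Lex.right _ (by simp)
  · exact Prod.Lex.right _ (by simp)
  · exact Prod.Lex.left _ _ (pvDcard_add_lt _ _ _ (pvMemKeys_of_get? _ _ _ h)
      (by simpa [PySem.Set.contains, List.contains_eq_mem] using hv))

def get_all_ancestors_structural_alt (po_term : String) (ontology : List (String × List (String × List (String × String)))) (visited : Option (List String)) : List String :=
  let vis0 := visited.getD []
  match (PySem.Dict.mk ontology).get? po_term with
  | none => vis0
  | some entry =>
    pvAncStack ontology (((PySem.Dict.mk entry).getD "parents" []).map Prod.snd)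
      (PySem.Set.add vis0 po_term)

-- ===== PRECONDITION & SPEC =====
def Spec_get_all_ancestors_structural (po_term : String) (ontology : List (String × List (String × List (String × String)))) (visited : Option (List String)) (out : List String) : Prop := out = get_all_ancestors_structural_alt po_term ontology visited
instance (po_term : String) (ontology : List (String × List (String × List (String × String)))) (visited : Option (List String)) (out : List String) : Decidable (Spec_get_all_ancestors_structural po_term ontology visited out) := by unfold Spec_get_all_ancestors_structural; infer_instance

-- ===== CLAIM (what is proved, stated in full; the proofs are below) =====
def Claim_equal_get_all_ancestors_structural : Prop := ∀ (po_term : String) (ontology : List (String × List (String × List (String × String)))) (visited : Option (List String)), Dom_get_all_ancestors_structural po_term ontology visited → Spec_get_all_ancestors_structural po_term ontology visited (get_all_ancestors_structural po_term ontology visited)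

-- ===== LEMMAS AND PROOFS =====

theorem pvAncGo_succ (ontology : List (String × List (String × List (String × String))))
    (f : Nat) (node : String) (vis : List String) :
    pvAncGo ontology (f + 1) node vis =
      match (PySem.Dict.mk ontology).get? node with
      | none => vis
      | some entry =>
        ((PySem.Dict.mk entry).getD "parents" []).foldl
          (fun v pr => if PySem.Set.contains v pr.2 then v else pvAncGo ontology f pr.2 v)
          (PySem.Set.add vis node) := rfl

theorem pvAncGo_nonkey (ontology : List (String × List (String × List (String × String))))
    (f : Nat) (node : String) (vis : List String)
    (h : (PySem.Dict.mk ontology).get? node = none) : pvAncGo ontology f node vis = vis := by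
  cases f with
  | zero => rfl
  | succ f => rw [pvAncGo_succ, h]

theorem pvAncGo_key (ontology : List (String × List (String × List (String × String))))
    (f : Nat) (node : String) (vis : List String)
    (entry : List (String × List (String × String)))
    (h : (PySem.Dict.mk ontology).get? node = some entry) :
    pvAncGo ontology (f + 1) node vis =
      ((PySem.Dict.mk entry).getD "parents" []).foldl
        (fun v pr => if PySem.Set.contains v pr.2 then v else pvAncGo ontology f pr.2 v)
        (PySem.Set.add vis node) := by
  rw [pvAncGo_succ, h]

theorem pvAncStack_nil (ontology : List (String × List (String × List (String × String))))
    (visited : List String) : pvAncStack ontology [] visited = visited := by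
  rw [pvAncStack]

theorem pvAncStack_skip_vis (ontology : List (String × List (String × List (String × String))))
    (node : String) (rest visited : List String)
    (h : PySem.Set.contains visited node = true) :
    pvAncStack ontology (node :: rest) visited = pvAncStack ontology rest visited := by
  rw [pvAncStack, dif_pos h]

theorem pvAncStack_skip_key (ontology : List (String × List (String × List (String × String))))
    (node : String) (rest visited : List String)
    (h1 : ¬ PySem.Set.contains visited node = true)
    (h2 : (PySem.Dict.mk ontology).get? node = none) :
    pvAncStack ontology (node :: rest) visited = pvAncStack ontology rest visited := by
  rw [pvAncStack, dif_neg h1]; split <;> simp_all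

theorem pvAncStack_push (ontology : List (String × List (String × List (String × String))))
    (node : String) (rest visited : List String)
    (entry : List (String × List (String × String)))
    (h1 : ¬ PySem.Set.contains visited node = true)
    (h2 : (PySem.Dict.mk ontology).get? node = some entry) :
    pvAncStack ontology (node :: rest) visited =
      pvAncStack ontology (((PySem.Dict.mk entry).getD "parents" []).map Prod.snd ++ rest)
        (PySem.Set.add visited node) := by
  rw [pvAncStack, dif_neg h1]; split <;> simp_all

theorem pvSetAdd_append (vis : List String) (k : String) :
    ∃ t, PySem.Set.add vis k = vis ++ t := by
  by_cases h : k ∈ vis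
  · exact ⟨[], by simp [PySem.Set.add, List.contains_eq_mem, h]⟩
  · exact ⟨[k], by simp [PySem.Set.add, List.contains_eq_mem, h]⟩

theorem pvAncGo_append (ontology : List (String × List (String × List (String × String))))
    (fuel : Nat) : ∀ (node : String) (vis : List String),
    ∃ t, pvAncGo ontology fuel node vis = vis ++ t := by
  induction fuel with
  | zero => exact fun node vis => ⟨[], by simp [pvAncGo]⟩
  | succ f ih =>
    intro node vis
    cases hget : (PySem.Dict.mk ontology).get? node with
    | none => exact ⟨[], by rw [pvAncGo_nonkey _ _ _ _ hget, List.append_nil]⟩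
    | some entry =>
      rw [pvAncGo_key _ _ _ _ _ hget]
      obtain ⟨t0, ht0⟩ := pvSetAdd_append vis node
      suffices h : ∀ (l : List (String × String)) (v : List String),
          ∃ t, l.foldl (fun v pr => if PySem.Set.contains v pr.2 then v
                        else pvAncGo ontology f pr.2 v) v = v ++ t by
        obtain ⟨t1, ht1⟩ := h ((PySem.Dict.mk entry).getD "parents" []) (PySem.Set.add vis node)
        exact ⟨t0 ++ t1, by rw [ht1, ht0, List.append_assoc]⟩
      intro l
      induction l with
      | nil => exact fun v => ⟨[], by simp⟩
      | cons pr l ihl =>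
        intro v
        rw [List.foldl_cons]
        by_cases hc : PySem.Set.contains v pr.2 = true
        · rw [if_pos hc]; exact ihl v
        · rw [if_neg hc]
          obtain ⟨t2, ht2⟩ := ih pr.2 v
          obtain ⟨t3, ht3⟩ := ihl (pvAncGo ontology f pr.2 v)
          exact ⟨t2 ++ t3, by rw [ht3, ht2, List.append_assoc]⟩

theorem pvDcard_le_of_append (ontology : List (String × List (String × List (String × String))))
    (vis t : List String) : pvDcard ontology (vis ++ t) ≤ pvDcard ontology vis := by
  unfold pvDcard
  apply Finset.card_le_card
  apply Finset.sdiff_subset_sdiff (Finset.Subset.refl _)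
  intro x hx
  simp at hx ⊢
  exact Or.inl hx

theorem pvDcard_le_len (ontology : List (String × List (String × List (String × String))))
    (vis : List String) : pvDcard ontology vis ≤ ontology.length := by
  calc pvDcard ontology vis ≤ (ontology.map Prod.fst).toFinset.card :=
        Finset.card_le_card Finset.sdiff_subset
    _ ≤ (ontology.map Prod.fst).length := List.toFinset_card_le _
    _ = ontology.length := List.length_map ..

-- simulation: popping the pushed parents one by one equals A's fold over the parents list
theorem pvSim (ontology : List (String × List (String × List (String × String)))) :
    ∀ (c : Nat) (vis : List String), pvDcard ontology vis ≤ c →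
    ∀ (ps : List (String × String)) (rest : List String) (fuel : Nat), c < fuel →
    pvAncStack ontology (ps.map Prod.snd ++ rest) vis
      = pvAncStack ontology rest
          (ps.foldl (fun v pr => if PySem.Set.contains v pr.2 then v
                     else pvAncGo ontology fuel pr.2 v) vis) := by
  intro c
  induction c using Nat.strong_induction_on with
  | _ c IH =>
    intro vis hvis ps
    induction ps generalizing vis with
    | nil => intro rest fuel _; simp
    | cons pr ps ihps =>
      intro rest fuel hfuel
      obtain ⟨f, rfl⟩ : ∃ f, fuel = f + 1 := ⟨fuel - 1, by omega⟩
      rw [List.map_cons, List.cons_append, List.foldl_cons]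
      by_cases hc : PySem.Set.contains vis pr.2 = true
      · rw [pvAncStack_skip_vis _ _ _ _ hc, if_pos hc]
        exact ihps vis hvis rest (f + 1) hfuel
      · rw [if_neg hc]
        cases hget : (PySem.Dict.mk ontology).get? pr.2 with
        | none =>
          rw [pvAncStack_skip_key _ _ _ _ hc hget, pvAncGo_nonkey _ _ _ _ hget]
          exact ihps vis hvis rest (f + 1) hfuel
        | some entry =>
          have hmem : pr.2 ∉ vis := by
            simpa [PySem.Set.contains, List.contains_eq_mem] using hc
          have hkey : pr.2 ∈ ontology.map Prod.fst := pvMemKeys_of_get? _ _ _ hget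
          have hlt : pvDcard ontology (PySem.Set.add vis pr.2) < pvDcard ontology vis :=
            pvDcard_add_lt _ _ _ hkey hmem
          rw [pvAncStack_push _ _ _ _ _ hc hget]
          rw [IH (pvDcard ontology (PySem.Set.add vis pr.2)) (by omega)
                (PySem.Set.add vis pr.2) (le_refl _)
                ((PySem.Dict.mk entry).getD "parents" []) (ps.map Prod.snd ++ rest) f (by omega)]
          rw [← pvAncGo_key _ _ _ _ _ hget]
          have hsub : pvDcard ontology (pvAncGo ontology (f + 1) pr.2 vis) ≤ c := by
            obtain ⟨t, ht⟩ := pvAncGo_append ontology (f + 1) pr.2 vis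
            rw [ht]
            exact le_trans (pvDcard_le_of_append _ _ _) hvis
          exact ihps (pvAncGo ontology (f + 1) pr.2 vis) hsub rest (f + 1) hfuel

-- ===== VERDICT (by name: the statement is the Claim_ definition above) =====
theorem get_all_ancestors_structural_spec : Claim_equal_get_all_ancestors_structural := by
  intro po_term ontology visited _
  unfold Spec_get_all_ancestors_structural
  unfold get_all_ancestors_structural get_all_ancestors_structural_alt
  cases hget : (PySem.Dict.mk ontology).get? po_term with
  | none => rw [pvAncGo_nonkey _ _ _ _ hget]
  | some entry =>
    rw [show ontology.length + 2 = (ontology.length + 1) + 1 from rfl,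
        pvAncGo_key _ _ _ _ _ hget]
    have hb := pvSim ontology
      (pvDcard ontology (PySem.Set.add (visited.getD []) po_term))
      (PySem.Set.add (visited.getD []) po_term) (le_refl _)
      ((PySem.Dict.mk entry).getD "parents" []) [] (ontology.length + 1)
      (by have h1 := pvDcard_le_len ontology (PySem.Set.add (visited.getD []) po_term); omega)
    rw [List.append_nil, pvAncStack_nil] at hb
    exact hb.symm
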